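-- pv_equiv track=rewrite | github.com/s70c3/searchmachine | service/text_recog/ocr.py | get_linear_size
-- ===== SOURCE A (Python) =====
-- LINEAR_MIN = 10
--
-- LINEAR_MAX = 5000
--
-- def get_linear_size(w):
--     if len(w) == 0:
--         return None
--
--     if not any(list(map(str.isdigit, w))):
--         return None
--     # if 'R' in w or 'K' in w or 'T' in w or 'P' in w:
--     #     return None
--     if 'R' in w:
--         return None
--     if w.count('.') > 2:
--         return None
--     sizes = []
--     start_i = -1
--     for i in range(len(w)):
--         if w[i].isdigit():
--             # find digit
--             if start_i == -1:
--                 start_i = i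
--             if i == len(w) - 1:
--                 size = w[start_i:len(w)]
--                 sizes.append(size)
--         else:
--             # digit ends
--             if start_i != -1:
--                 size = w[start_i:i]
--                 sizes.append(size)
--             start_i = -1
--     if len(sizes) == 0:
--         return None
--
--     # delete probably papers ids
--     if '4447' in sizes:
--         sizes.remove('4447')
--     if '4465' in sizes:
--         sizes.remove('4465')
--
--     sizes = list(map(int, sizes))
--     for size in sizes:
--         if size > 9999 and size % 100 // 10 == 4:
--             size = size // 100
--     if len(sizes) > 0:
--         maxsize = max(sizes)
--     if LINEAR_MIN < maxsize < LINEAR_MAX: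
--         return maxsize
-- ===== SOURCE B (Python) =====
-- LINEAR_MIN = 10
--
-- LINEAR_MAX = 5000
--
-- def get_linear_size(w):
--     if 'R' in w or w.count('.') > 2:
--         return None
--     # mask non-digits to spaces, then whitespace-split: the maximal digit runs
--     runs = ''.join(c if c.isdigit() else ' ' for c in w).split()
--     # single pass: skip one '4447' and one '4465' (probable paper ids),
--     # keep a running maximum of the remaining runs
--     skip4447 = skip4465 = True
--     best = None
--     for s in runs:
--         if s == '4447' and skip4447:
--             skip4447 = False
--         elif s == '4465' and skip4465:
--             skip4465 = False
--         else:
--             v = int(s)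
--             if best is None or v > best:
--                 best = v
--     if best is None:
--         return None
--     return best if LINEAR_MIN < best < LINEAR_MAX else None
-- ===== Notes on version B (the rewrite author's own statement) =====
-- stated objective: alternative
-- what changed: B extracts the digit runs by masking non-digits to spaces and whitespace-splitting (instead of A's index/start_i state-machine slicing), and replaces A's build-list / remove('4447') / remove('4465') / map(int) / max() pipeline with a single pass that keeps a running maximum while skipping one occurrence of each paper id via two flags; Pre_ excludes the inputs where A raises UnboundLocalError, where B returns None.
-- outside the precondition, e.g. on get_linear_size('4447'): A raises UnboundLocalError, B returns None; on get_linear_size('4465'): A raises UnboundLocalError, B returns None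
import Mathlib
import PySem

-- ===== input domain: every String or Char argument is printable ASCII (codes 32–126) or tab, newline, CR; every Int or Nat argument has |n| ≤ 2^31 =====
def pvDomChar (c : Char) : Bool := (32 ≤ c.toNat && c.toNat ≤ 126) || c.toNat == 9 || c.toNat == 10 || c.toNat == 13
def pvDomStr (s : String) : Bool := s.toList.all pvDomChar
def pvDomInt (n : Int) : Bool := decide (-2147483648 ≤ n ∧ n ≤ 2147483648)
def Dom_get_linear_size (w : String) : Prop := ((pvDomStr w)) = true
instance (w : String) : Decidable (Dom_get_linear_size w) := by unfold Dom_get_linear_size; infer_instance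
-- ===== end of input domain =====

-- B finds the digit runs by masking non-digits to spaces and whitespace-splitting, then makes
-- one pass keeping a running maximum while skipping one '4447'/'4465' via two flags, instead of
-- A's index state machine + list + remove + max (objective: alternative; A's UnboundLocalError
-- inputs are outside Pre_, where B returns none).

-- ===== PORT A =====
-- the 'for i in range(len(w))' loop with state (sizes, start_i), transliterated as a
-- recursion on the index i over the full character list
def pvLoopA (cs : List Char) (i : Nat) (start : Int) (sizes : List String) : List String :=
  if h : i < cs.length then
    if PySem.Chars.isdigit cs[i] then            -- w[i].isdigit()
      let start1 : Int := if start == -1 then (i : Int) else start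
      let sizes1 := if i == cs.length - 1
        then sizes ++ [String.ofList (PySem.List.slice cs (some start1) (some (cs.length : Int)))]  -- w[start_i:len(w)]
        else sizes
      pvLoopA cs (i + 1) start1 sizes1
    else
      let sizes1 := if start != -1
        then sizes ++ [String.ofList (PySem.List.slice cs (some start) (some (i : Int)))]  -- w[start_i:i]
        else sizes
      pvLoopA cs (i + 1) (-1) sizes1
  else sizes
  termination_by cs.length - i

def get_linear_size (w : String) : Option Int :=
  let cs := w.toList
  if cs.length = 0 then none
  -- any(map(str.isdigit, w)): str.isdigit on a 1-character string is exactly isdigit of that char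
  else if (cs.map (fun c => PySem.Chars.isdigit c)).any (fun b => b) = false then none
  else if PySem.Str.isIn "R" w then none
  else if 2 < PySem.Str.count w "." then none
  else
    let sizes := pvLoopA cs 0 (-1) []
    if sizes.length = 0 then none
    else
      let sizes := if "4447" ∈ sizes then (PySem.List.remove? sizes "4447").getD sizes else sizes
      let sizes := if "4465" ∈ sizes then (PySem.List.remove? sizes "4465").getD sizes else sizes
      -- sizes = list(map(int, sizes)); each element is a nonempty digit run, so int() succeeds
      let sizes := sizes.map (fun s => (PySem.Int.ofStr? s).getD 0)
      -- 'for size in sizes: if …: size = size // 100' rebinds a local and has no effect: discarded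
      let _ := sizes.map (fun size =>
        if 9999 < size ∧ PySem.Int.floordiv (PySem.Int.mod size 100) 10 = 4
        then PySem.Int.floordiv size 100 else size)
      match PySem.List.max? sizes (fun x => x) with
      | some maxsize => if 10 < maxsize ∧ maxsize < 5000 then some maxsize else none
      | none => none  -- Python raises UnboundLocalError here; excluded by Pre_

-- ===== PORT B =====
-- the 'for s in runs' loop with state (best, skip4447, skip4465)
def pvLoopB : List String → Option Int → Bool → Bool → Option Int
  | [], best, _, _ => best
  | s :: t, best, sk1, sk2 =>
    if s == "4447" && sk1 then pvLoopB t best false sk2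
    else if s == "4465" && sk2 then pvLoopB t best sk1 false
    else
      let v := (PySem.Int.ofStr? s).getD 0   -- int(s)
      let best1 : Option Int := match best with
        | none => some v
        | some b => if b < v then some v else some b   -- if best is None or v > best
      pvLoopB t best1 sk1 sk2

def get_linear_size_alt (w : String) : Option Int :=
  if PySem.Str.isIn "R" w || decide (2 < PySem.Str.count w ".") then none
  else
    -- ''.join(c if c.isdigit() else ' ' for c in w).split()
    let runs := (PySem.Chars.split₀
        (w.toList.map (fun c => if PySem.Chars.isdigit c then c else ' '))).map String.ofList
    match pvLoopB runs none true true with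
    | none => none
    | some best => if 10 < best ∧ best < 5000 then some best else none

-- ===== PRECONDITION & SPEC =====
-- closed form of the crash inputs: guards passed and the digit runs of w (non-digit characters
-- blanked out, then whitespace-split) are exactly the removed paper ids
def pvCrashCond (w : String) : Bool :=
  !(PySem.Str.isIn "R" w) && decide (PySem.Str.count w "." ≤ 2) &&
  decide ((PySem.Chars.split₀
      (w.toList.map (fun c => if PySem.Chars.isdigit c then c else ' '))).map String.ofList ∈
    ([["4447"], ["4465"], ["4447", "4465"], ["4465", "4447"]] : List (List String)))

-- Pre_ excludes exactly the inputs on which A raises UnboundLocalError (digit runs are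
-- exactly the removed paper ids '4447'/'4465'); B returns none there.
def Pre_get_linear_size (w : String) : Prop := ¬ (pvCrashCond w = true)
instance (w : String) : Decidable (Pre_get_linear_size w) := by unfold Pre_get_linear_size; infer_instance
def pvWitness_get_linear_size : String := "12 mm"

def Spec_get_linear_size (w : String) (out : Option Int) : Prop := out = get_linear_size_alt w
instance (w : String) (out : Option Int) : Decidable (Spec_get_linear_size w out) := by unfold Spec_get_linear_size; infer_instance

-- ===== CLAIM (what is proved, stated in full; the proofs are below) =====
def Claim_equal_get_linear_size : Prop := ∀ (w : String), Dom_get_linear_size w → Pre_get_linear_size w → Spec_get_linear_size w (get_linear_size w)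

-- ===== LEMMAS AND PROOFS =====

-- the maximal digit runs of a character list (proof-side characterisation of both loops)
def pvDigitGroups : List Char → List (List Char)
  | [] => []
  | c :: cs =>
    let rest := pvDigitGroups cs
    if PySem.Chars.isdigit c then
      if cs.head?.any PySem.Chars.isdigit then
        match rest with
        | g :: gs => (c :: g) :: gs
        | [] => [[c]]  -- unreachable: cs starts with a digit, so rest ≠ []
      else [c] :: rest
    else rest

lemma pvDigitGroups_cons_not (c : Char) (cs : List Char) (h : PySem.Chars.isdigit c = false) :
    pvDigitGroups (c :: cs) = pvDigitGroups cs := by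
  simp [pvDigitGroups, h]

lemma pvDigitGroups_cons_digit (cs : List Char) : ∀ (c : Char), PySem.Chars.isdigit c = true →
    pvDigitGroups (c :: cs) =
      (c :: cs.takeWhile PySem.Chars.isdigit) :: pvDigitGroups (cs.dropWhile PySem.Chars.isdigit) := by
  induction cs with
  | nil => intro c h; simp [pvDigitGroups, h]
  | cons d t ih =>
    intro c h
    by_cases hd : PySem.Chars.isdigit d = true
    · rw [show pvDigitGroups (c :: d :: t) = match pvDigitGroups (d :: t) with
        | g :: gs => (c :: g) :: gs | [] => [[c]] from by simp [pvDigitGroups, h, hd]]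
      rw [ih d hd]
      simp [hd]
    · have hd' : PySem.Chars.isdigit d = false := by simpa using hd
      simp [pvDigitGroups, h, hd']

lemma pvDigitGroups_eq_nil_iff (cs : List Char) :
    pvDigitGroups cs = [] ↔ cs.all (fun c => !PySem.Chars.isdigit c) := by
  induction cs with
  | nil => simp [pvDigitGroups]
  | cons c t ih =>
    by_cases hc : PySem.Chars.isdigit c = true
    · simp [pvDigitGroups_cons_digit t c hc, hc]
    · have hc' : PySem.Chars.isdigit c = false := by simpa using hc
      simp [pvDigitGroups_cons_not c t hc', hc', ih]

lemma pvLoopA_exit (cs : List Char) (i : Nat) (st : Int) (S : List String)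
    (h : cs.length ≤ i) : pvLoopA cs i st S = S := by
  unfold pvLoopA; simp [Nat.not_lt.mpr h]

lemma pvSplit₀go_mask (cs : List Char) : ∀ (cur : List Char) (acc : List (List Char)),
    (PySem.Chars.split₀.go (cs.map (fun c => if PySem.Chars.isdigit c then c else ' ')) cur acc
      = if cur.isEmpty then acc.reverse ++ pvDigitGroups cs
        else acc.reverse ++ (cur.reverse ++ cs.takeWhile PySem.Chars.isdigit)
          :: pvDigitGroups (cs.dropWhile PySem.Chars.isdigit)) := by
  induction cs with
  | nil =>
    intro cur acc
    by_cases hc : cur.isEmpty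
    · simp [PySem.Chars.split₀.go, hc, pvDigitGroups]
    · simp [PySem.Chars.split₀.go, hc, pvDigitGroups]
  | cons c t ih =>
    intro cur acc
    by_cases hd : PySem.Chars.isdigit c = true
    · have hsp : PySem.Chars.isspace c = false := by
        have hd2 := hd
        simp only [PySem.Chars.isdigit, Bool.and_eq_true, decide_eq_true_eq, Char.le_def,
          UInt32.le_iff_toNat_le] at hd2
        have h0 : '0'.val.toNat = 48 := rfl
        have h9 : '9'.val.toNat = 57 := rfl
        rw [h0, h9] at hd2
        simp only [PySem.Chars.isspace]
        simp only [Bool.or_eq_false_iff, Bool.and_eq_false_iff, decide_eq_false_iff_not,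
          Char.toNat]
        omega
      simp only [List.map_cons, hd, if_true, PySem.Chars.split₀.go, hsp, Bool.false_eq_true,
        if_false]
      rw [ih (c :: cur) acc]
      simp only [List.isEmpty_cons, Bool.false_eq_true, if_false, List.reverse_cons]
      by_cases hc : cur.isEmpty
      · have hcur : cur = [] := List.isEmpty_iff.mp hc
        subst hcur
        simp [pvDigitGroups_cons_digit _ _ hd]
      · have hc' : cur.isEmpty = false := by simpa using hc
        simp [hc', List.takeWhile_cons_of_pos hd, List.dropWhile_cons_of_pos hd]
    · have hd' : PySem.Chars.isdigit c = false := by simpa using hd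
      have hsp : PySem.Chars.isspace ' ' = true := by decide
      simp only [List.map_cons, hd', Bool.false_eq_true, if_false, PySem.Chars.split₀.go, hsp,
        if_true]
      by_cases hc : cur.isEmpty
      · rw [if_pos hc, ih [] acc]
        simp [pvDigitGroups_cons_not _ _ hd', hc]
      · rw [if_neg hc, ih [] (cur.reverse :: acc)]
        rw [if_neg hc]
        have htw : List.takeWhile PySem.Chars.isdigit (c :: t) = [] := by
          simp [hd']
        have hdw : List.dropWhile PySem.Chars.isdigit (c :: t) = c :: t := by
          simp [hd']
        simp [pvDigitGroups_cons_not _ _ hd', htw, hdw]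

lemma pvSplit₀_mask (cs : List Char) :
    PySem.Chars.split₀ (cs.map (fun c => if PySem.Chars.isdigit c then c else ' '))
      = pvDigitGroups cs := by
  rw [show PySem.Chars.split₀ (cs.map (fun c => if PySem.Chars.isdigit c then c else ' '))
      = PySem.Chars.split₀.go (cs.map (fun c => if PySem.Chars.isdigit c then c else ' ')) [] []
    from rfl]
  rw [pvSplit₀go_mask cs [] []]
  simp

lemma pvTakeLenTakeWhile (l : List Char) (p : Char → Bool) :
    l.take (l.takeWhile p).length = l.takeWhile p := by
  set w := l.takeWhile p with hw
  obtain ⟨t, ht⟩ := List.takeWhile_prefix (l := l) p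
  rw [← hw] at ht
  rw [← ht, List.take_left]

-- invariant of A's scanning loop: with no open run it emits the digit runs of the suffix;
-- with an open run started at s it first closes that run
lemma pvLoopA_main (cs : List Char) : ∀ k i, cs.length - i = k → i ≤ cs.length →
    (∀ S, pvLoopA cs i (-1) S = S ++ (pvDigitGroups (cs.drop i)).map String.ofList) ∧
    (∀ (s : Nat) (S : List String), s ≤ i → i < cs.length →
      ((cs.drop s).take (i - s)).all PySem.Chars.isdigit = true →
      pvLoopA cs i ((s : Nat) : Int) S =
        S ++ String.ofList ((cs.drop s).take ((i - s) + ((cs.drop i).takeWhile PySem.Chars.isdigit).length))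
          :: (pvDigitGroups ((cs.drop i).dropWhile PySem.Chars.isdigit)).map String.ofList) := by
  intro k
  induction k with
  | zero =>
    intro i hk hle
    have hi : i = cs.length := by omega
    refine ⟨fun S => ?_, fun s S hs hlt _ => by omega⟩
    subst hi
    rw [pvLoopA_exit _ _ _ _ (le_refl _)]
    simp [pvDigitGroups]
  | succ k ih =>
    intro i hk hle
    have hi : i < cs.length := by omega
    have hk1 : cs.length - (i + 1) = k := by omega
    have hdrop : cs.drop i = cs[i] :: cs.drop (i + 1) := List.drop_eq_getElem_cons hi
    constructor
    · intro S
      rw [pvLoopA]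
      rw [dif_pos hi]
      by_cases hc : PySem.Chars.isdigit cs[i] = true
      · rw [if_pos hc]
        simp only [BEq.rfl, if_pos]
        by_cases hlast : i = cs.length - 1
        · have hlen : i + 1 = cs.length := by omega
          rw [if_pos (by simpa using hlast)]
          rw [pvLoopA_exit _ _ _ _ (by omega)]
          have hnil : cs.drop (i + 1) = [] := by rw [hlen]; exact cs.drop_length
          rw [PySem.List.slice_natCast, hdrop, hnil, pvDigitGroups_cons_digit _ _ hc]
          simp [pvDigitGroups, show cs.length - i = 1 by omega]
        · rw [if_neg (by simpa using hlast)]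
          have hall1 : (List.take (i + 1 - i) (List.drop i cs)).all PySem.Chars.isdigit = true := by
            rw [show i + 1 - i = 1 by omega, hdrop]
            simp only [List.take_succ_cons, List.take_zero, List.all_cons, List.all_nil, hc,
              Bool.and_self]
          rw [(ih (i + 1) hk1 (by omega)).2 i S (by omega) (by omega) hall1]
          rw [hdrop, pvDigitGroups_cons_digit _ _ hc]
          simp only [List.map_cons]
          congr 2
          rw [show i + 1 - i + (List.takeWhile PySem.Chars.isdigit (cs.drop (i + 1))).length
              = (List.takeWhile PySem.Chars.isdigit (cs.drop (i + 1))).length + 1 by omega]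
          rw [List.take_succ_cons, pvTakeLenTakeWhile]
      · have hc' : PySem.Chars.isdigit cs[i] = false := by simpa using hc
        rw [if_neg (by simp [hc'])]
        simp only [bne_self_eq_false, Bool.false_eq_true, if_false]
        rw [(ih (i + 1) hk1 (by omega)).1 S]
        rw [hdrop, pvDigitGroups_cons_not _ _ hc']
    · intro s S hs hlt hall
      rw [pvLoopA]
      rw [dif_pos hi]
      have hsbeq : ((s : Int) == -1) = false := by rw [beq_eq_false_iff_ne]; omega
      by_cases hc : PySem.Chars.isdigit cs[i] = true
      · rw [if_pos hc, hsbeq]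
        simp only [Bool.false_eq_true, if_false]
        by_cases hlast : i = cs.length - 1
        · rw [if_pos (by simpa using hlast)]
          rw [pvLoopA_exit _ _ _ _ (by omega)]
          have hnil : cs.drop (i + 1) = [] := by
            rw [show i + 1 = cs.length by omega]; exact cs.drop_length
          rw [hdrop, hnil]
          simp only [List.takeWhile_cons_of_pos hc, List.dropWhile_cons_of_pos hc,
            List.takeWhile_nil, List.dropWhile_nil]
          simp [pvDigitGroups]
          rw [PySem.List.slice_natCast]
          congr 2
          have : (cs.drop s).length = cs.length - s := cs.length_drop ..
          rw [show i - s + 1 = cs.length - s by omega]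
        · rw [if_neg (by simpa using hlast)]
          have hall2 : (List.take (i + 1 - s) (List.drop s cs)).all PySem.Chars.isdigit = true := by
            rw [show i + 1 - s = (i - s) + 1 by omega, List.take_add_one, List.all_append, hall]
            have hge : (cs.drop s)[i - s]? = some cs[i] := by
              rw [List.getElem?_drop, show s + (i - s) = i by omega]
              exact List.getElem?_eq_getElem hi
            simp [hge, hc]
          rw [(ih (i + 1) hk1 (by omega)).2 s S (by omega) (by omega) hall2]
          rw [hdrop]
          rw [List.takeWhile_cons_of_pos hc, List.dropWhile_cons_of_pos hc]
          simp only [List.length_cons]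
          rw [show i + 1 - s + (List.takeWhile PySem.Chars.isdigit (List.drop (i + 1) cs)).length
              = i - s + ((List.takeWhile PySem.Chars.isdigit (List.drop (i + 1) cs)).length + 1) by
            omega]
      · have hc' : PySem.Chars.isdigit cs[i] = false := by simpa using hc
        rw [if_neg (by simp [hc'])]
        have hsbne : ((s : Int) != -1) = true := by rw [bne_iff_ne]; omega
        rw [hsbne]
        simp only [if_true]
        rw [(ih (i + 1) hk1 (by omega)).1]
        rw [PySem.List.slice_natCast, hdrop]
        rw [List.takeWhile_cons_of_neg (by simp [hc']), List.dropWhile_cons_of_neg (by simp [hc'])]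
        rw [pvDigitGroups_cons_not _ _ hc']
        simp

lemma pvLoopA_eq_groups (cs : List Char) :
    pvLoopA cs 0 (-1) [] = (pvDigitGroups cs).map String.ofList := by
  simpa using (pvLoopA_main cs (cs.length) 0 rfl (Nat.zero_le _)).1 []

-- proof-side running-maximum fold (the 'best' accumulator of B's loop, skips already resolved)
def pvMFold : Option Int → List Int → Option Int
  | best, [] => best
  | none, v :: t => pvMFold (some v) t
  | some b, v :: t => pvMFold (some (max b v)) t

lemma pvMFold_some (t : List Int) : ∀ b, pvMFold (some b) t = some (t.foldl max b) := by
  induction t with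
  | nil => intro b; simp [pvMFold]
  | cons v t ih => intro b; simp [pvMFold, ih]

lemma pvMFold_eq_max? (L : List Int) : pvMFold none L = PySem.List.max? L (fun x => x) := by
  cases L with
  | nil => simp [pvMFold, PySem.List.max?]
  | cons x t => rw [PySem.List.max?_id_cons]; simpa [pvMFold] using pvMFold_some t x

-- B's loop with its four flag states, as running maxima over the correspondingly erased lists
lemma pvLoopB_states (G : List String) : ∀ best,
    (pvLoopB G best false false
       = pvMFold best (G.map (fun s => (PySem.Int.ofStr? s).getD 0))) ∧
    (pvLoopB G best true false
       = pvMFold best ((G.erase "4447").map (fun s => (PySem.Int.ofStr? s).getD 0))) ∧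
    (pvLoopB G best false true
       = pvMFold best ((G.erase "4465").map (fun s => (PySem.Int.ofStr? s).getD 0))) ∧
    (pvLoopB G best true true
       = pvMFold best (((G.erase "4447").erase "4465").map (fun s => (PySem.Int.ofStr? s).getD 0))) := by
  induction G with
  | nil => intro best; simp [pvLoopB, pvMFold]
  | cons s t ih =>
    intro best
    have hstep : ∀ (b : Option Int) (v : Int),
        (match b with | none => some v | some x => if x < v then some v else some x)
          = some (match b with | none => v | some x => max b.get! v) := by
      intro b v
      cases b with
      | none => rfl
      | some x =>
        by_cases h : x < v
        · simp [h, max_eq_right (le_of_lt h)]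
        · simp [h, max_eq_left (le_of_not_gt h)]
    have hmstep : ∀ (b : Option Int) (v : Int) (L : List Int),
        pvMFold b (v :: L) = pvMFold (match b with
          | none => some v | some x => if x < v then some v else some x) L := by
      intro b v L
      cases b with
      | none => rfl
      | some x =>
        by_cases h : x < v
        · simp [pvMFold, h, max_eq_right (le_of_lt h)]
        · simp [pvMFold, h, max_eq_left (le_of_not_gt h)]
    refine ⟨?_, ?_, ?_, ?_⟩
    · -- both skips spent: plain running max
      simp only [pvLoopB, Bool.and_false, Bool.false_eq_true, if_false, List.map_cons, hmstep]
      exact ((ih _).1)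
    · -- '4447' skip live
      by_cases h1 : s = "4447"
      · subst h1
        simp only [pvLoopB, BEq.rfl, Bool.and_true, if_true, List.erase_cons_head]
        exact (ih best).1
      · have hb : (s == "4447") = false := beq_eq_false_iff_ne.mpr h1
        rw [List.erase_cons_tail (show ¬(s == "4447") = true by simp [hb])]
        simp only [pvLoopB, hb, Bool.false_and, Bool.and_false, Bool.false_eq_true, if_false,
          List.map_cons, hmstep]
        exact ((ih _).2.1)
    · -- '4465' skip live
      by_cases h2 : s = "4465"
      · subst h2
        simp only [pvLoopB, Bool.and_false, Bool.false_eq_true, if_false, BEq.rfl, Bool.and_true,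
          if_true, List.erase_cons_head]
        exact (ih best).1
      · have hb : (s == "4465") = false := beq_eq_false_iff_ne.mpr h2
        rw [List.erase_cons_tail (show ¬(s == "4465") = true by simp [hb])]
        simp only [pvLoopB, hb, Bool.false_and, Bool.and_false, Bool.false_eq_true, if_false,
          List.map_cons, hmstep]
        exact ((ih _).2.2.1)
    · -- both skips live
      by_cases h1 : s = "4447"
      · subst h1
        simp only [pvLoopB, BEq.rfl, Bool.and_true, if_true, List.erase_cons_head]
        exact (ih best).2.2.1
      · have hb1 : (s == "4447") = false := beq_eq_false_iff_ne.mpr h1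
        by_cases h2 : s = "4465"
        · subst h2
          simp only [pvLoopB, hb1, Bool.false_eq_true, if_false, BEq.rfl,
            Bool.and_true, if_true]
          rw [List.erase_cons_tail (show ¬(("4465" : String) == "4447") = true by decide),
            List.erase_cons_head]
          exact (ih best).2.1
        · have hb2 : (s == "4465") = false := beq_eq_false_iff_ne.mpr h2
          simp only [pvLoopB, hb1, hb2, Bool.false_and, Bool.false_eq_true, if_false]
          rw [List.erase_cons_tail (show ¬(s == "4447") = true by simp [hb1]),
            List.erase_cons_tail (show ¬(s == "4465") = true by simp [hb2])]
          simp only [List.map_cons, hmstep]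
          exact ((ih _).2.2.2)

-- A's two conditional remove? calls are exactly two List.erase
lemma pvRemove_eq_erase (G : List String) (x : String) :
    (if x ∈ G then (PySem.List.remove? G x).getD G else G) = G.erase x := by
  by_cases hm : x ∈ G
  · rw [if_pos hm, PySem.List.remove?_eq_some_erase G x hm]; rfl
  · rw [if_neg hm, List.erase_of_not_mem hm]

-- ===== VERDICT (by name: the statement is the Claim_ definition above) =====
theorem get_linear_size_spec : Claim_equal_get_linear_size := by
  intro w _ _
  unfold Spec_get_linear_size get_linear_size get_linear_size_alt
  simp only [pvLoopA_eq_groups, pvSplit₀_mask, pvRemove_eq_erase,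
    (pvLoopB_states _ none).2.2.2, pvMFold_eq_max?]
  -- both sides now branch on the same max?; remaining work is per-guard case analysis
  by_cases hR : PySem.Str.isIn "R" w = true
  · simp only [hR, Bool.true_or]
    split_ifs <;> simp_all
  · have hR' : PySem.Str.isIn "R" w = false := by simpa using hR
    by_cases hdot : 2 < PySem.Str.count w "."
    · simp only [hR', Bool.false_eq_true, if_false, Bool.false_or]
      rw [if_pos (decide_eq_true hdot), if_pos hdot]
      split_ifs <;> rfl
    · simp only [hR', if_neg hdot]
      rw [if_neg (show ¬ ((false || decide (2 < PySem.Str.count w ".")) = true) by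
        rw [decide_eq_false hdot]; simp)]
      by_cases hany : (w.toList.map (fun c => PySem.Chars.isdigit c)).any (fun b => b) = false
      · -- no digit anywhere: A returns none in its first or second guard, B's run list is empty
        have hgrp : pvDigitGroups w.toList = [] := by
          rw [pvDigitGroups_eq_nil_iff]
          simp only [List.any_map, List.any_eq_false] at hany
          simp only [List.all_eq_true]
          intro c hc
          simpa using hany c hc
        simp [hgrp, PySem.List.max?]
      · have hany' : (w.toList.map (fun c => PySem.Chars.isdigit c)).any (fun b => b) = true := by
          simpa using hany
        have hgrp : pvDigitGroups w.toList ≠ [] := by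
          intro hnil
          rw [pvDigitGroups_eq_nil_iff] at hnil
          simp only [List.any_map, List.any_eq_true] at hany'
          obtain ⟨c, hc, hdig⟩ := hany'
          simp only [List.all_eq_true] at hnil
          have := hnil c hc
          simp_all
        have hlen0 : ¬ w.toList.length = 0 := by
          intro h0
          exact hgrp (by simp [List.eq_nil_of_length_eq_zero h0, pvDigitGroups])
        simp only [if_neg hlen0, hany', Bool.true_eq_false, if_false]
        have hmaplen : ¬ ((pvDigitGroups w.toList).map String.ofList).length = 0 := by
          simp [hgrp]
        rw [if_neg hmaplen]
        rw [if_neg (show ¬(false = true) by simp)]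
        cases PySem.List.max? ((((List.map String.ofList (pvDigitGroups w.toList)).erase
            "4447").erase "4465").map (fun s => (PySem.Int.ofStr? s).getD 0)) (fun x => x) <;> rfl
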